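-- pv_equiv track=rewrite | github.com/ektakotnala5-arch/-ai-gym-trainer | backend/routes/dietician.py | filter_allergies
-- ===== SOURCE A (Python) =====
-- def filter_allergies(items, allergies):
--     allergen_map = {
--         "gluten": ["wheat", "bread", "roti", "oats", "barley", "seitan", "upma", "poha", "paratha", "toast"],
--         "dairy": ["milk", "paneer", "curd", "yogurt", "cheese", "butter", "whey", "casein", "ghee", "buttermilk"],
--         "nuts": ["almond", "walnut", "cashew", "peanut", "pistachio", "nut"],
--         "eggs": ["egg"],
--         "soy": ["soya", "tofu", "soy"],
--         "shellfish": ["prawn", "shrimp", "crab", "lobster"],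
--         "fish": ["fish", "salmon", "tuna", "rohu", "mackerel"],
--     }
--     banned = set()
--     for allergy in allergies:
--         if allergy in allergen_map:
--             banned.update(allergen_map[allergy])
--     filtered = []
--     for item in items:
--         item_lower = item.lower()
--         if not any(b in item_lower for b in banned):
--             filtered.append(item)
--     return filtered
-- ===== SOURCE B (Python) =====
-- def filter_allergies(items, allergies):
--     allergen_map = {
--         "gluten": ["wheat", "bread", "roti", "oats", "barley", "seitan", "upma", "poha", "paratha", "toast"],
--         "dairy": ["milk", "paneer", "curd", "yogurt", "cheese", "butter", "whey", "casein", "ghee", "buttermilk"],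
--         "nuts": ["almond", "walnut", "cashew", "peanut", "pistachio", "nut"],
--         "eggs": ["egg"],
--         "soy": ["soya", "tofu", "soy"],
--         "shellfish": ["prawn", "shrimp", "crab", "lobster"],
--         "fish": ["fish", "salmon", "tuna", "rohu", "mackerel"],
--     }
--     # Index the active allergens' synonyms by their first character; then each
--     # item is checked by a single left-to-right positional scan that matches
--     # candidate patterns in place (no per-pattern substring search).
--     index = {}
--     for key, syns in allergen_map.items():
--         if key in allergies:
--             for s in syns:
--                 index.setdefault(s[0], []).append(s)
--
--     def unsafe(item):
--         low = item.lower()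
--         for i in range(len(low)):
--             for pat in index.get(low[i], []):
--                 if low.startswith(pat, i):
--                     return True
--         return False
--
--     return [item for item in items if not unsafe(item)]
-- ===== Notes on version B (the rewrite author's own statement) =====
-- stated objective: alternative
-- what changed: Instead of A's banned-set pass plus a per-pattern substring test for every item, B indexes the active allergens' synonyms by first character into a dict and decides each item with one left-to-right positional scan that matches only the candidate patterns starting at each position.
import Mathlib
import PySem

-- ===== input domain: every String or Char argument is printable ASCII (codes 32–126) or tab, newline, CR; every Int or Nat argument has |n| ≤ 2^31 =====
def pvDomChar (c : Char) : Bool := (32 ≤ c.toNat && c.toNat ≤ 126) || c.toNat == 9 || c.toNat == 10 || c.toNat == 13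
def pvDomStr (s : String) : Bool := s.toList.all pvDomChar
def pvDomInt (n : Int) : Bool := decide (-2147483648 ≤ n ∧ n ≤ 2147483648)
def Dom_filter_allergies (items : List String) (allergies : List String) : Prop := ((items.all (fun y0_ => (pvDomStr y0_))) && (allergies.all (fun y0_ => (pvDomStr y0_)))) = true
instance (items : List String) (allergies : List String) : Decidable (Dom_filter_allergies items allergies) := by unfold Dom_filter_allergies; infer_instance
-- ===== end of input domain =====

-- B replaces A's per-pattern substring tests by a first-character index of the active
-- synonyms and a single positional scan per item matching candidates in place (objective: alternative).


-- ===== PORT A =====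
-- the dict literal both Python sources carry inline
def pvAllergenMap : PySem.Dict String (List String) := PySem.Dict.ofList [
  ("gluten", ["wheat", "bread", "roti", "oats", "barley", "seitan", "upma", "poha", "paratha", "toast"]),
  ("dairy", ["milk", "paneer", "curd", "yogurt", "cheese", "butter", "whey", "casein", "ghee", "buttermilk"]),
  ("nuts", ["almond", "walnut", "cashew", "peanut", "pistachio", "nut"]),
  ("eggs", ["egg"]),
  ("soy", ["soya", "tofu", "soy"]),
  ("shellfish", ["prawn", "shrimp", "crab", "lobster"]),
  ("fish", ["fish", "salmon", "tuna", "rohu", "mackerel"])]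

def filter_allergies (items : List String) (allergies : List String) : List String :=
  let banned : PySem.Set String :=
    allergies.foldl (fun banned allergy =>
      if pvAllergenMap.contains allergy then
        PySem.Set.update banned (pvAllergenMap.getD allergy [])
      else banned) PySem.Set.empty
  items.foldl (fun filtered item =>
    let item_lower := PySem.Str.lower item
    if banned.any (fun b => PySem.Str.isIn b item_lower) then filtered
    else filtered ++ [item]) []

-- ===== PORT B =====
-- 'index.setdefault(s[0], []).append(s)' = modify at key s[0]; every synonym is a
-- nonempty literal, so s[0] is ported as s.toList.headD ' '
def pvIdx (allergies : List String) : PySem.Dict Char (List String) :=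
  pvAllergenMap.items.foldl (fun index kv =>
    if allergies.contains kv.1 then
      kv.2.foldl (fun index s => index.modify (s.toList.headD ' ') [] (· ++ [s])) index
    else index) PySem.Dict.empty

-- the nested 'def unsafe(item)': positional scan; 'low.startswith(pat, i)' with
-- 0 ≤ i ≤ len(low) is exactly 'pat is a prefix of low[i:]'
def pvUnsafe (index : PySem.Dict Char (List String)) (item : String) : Bool :=
  let low := (PySem.Str.lower item).toList
  (List.range low.length).any (fun i =>
    (index.getD (low.getD i ' ') []).any (fun pat =>
      pat.toList.isPrefixOf (low.drop i)))

def filter_allergies_alt (items : List String) (allergies : List String) : List String :=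
  let index := pvIdx allergies
  items.filter (fun item => !(pvUnsafe index item))

-- ===== PRECONDITION & SPEC =====
def Spec_filter_allergies (items : List String) (allergies : List String) (out : List String) : Prop := out = filter_allergies_alt items allergies
instance (items : List String) (allergies : List String) (out : List String) : Decidable (Spec_filter_allergies items allergies out) := by unfold Spec_filter_allergies; infer_instance

-- ===== CLAIM (what is proved, stated in full; the proofs are below) =====
def Claim_equal_filter_allergies : Prop := ∀ (items : List String) (allergies : List String), Dom_filter_allergies items allergies → Spec_filter_allergies items allergies (filter_allergies items allergies)

-- ===== LEMMAS AND PROOFS =====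

-- every synonym in the map literal is nonempty
theorem pv_syn_ne_nil : ∀ kv ∈ pvAllergenMap.items, ∀ s ∈ kv.2, s.toList ≠ [] := by decide

theorem pv_keys_nodup : pvAllergenMap.keys.Nodup := by decide

-- membership in A's banned set after the building fold
theorem pv_mem_banned (allergies : List String) (s : PySem.Set String) (x : String) :
    x ∈ allergies.foldl (fun banned allergy =>
      if pvAllergenMap.contains allergy then
        PySem.Set.update banned (pvAllergenMap.getD allergy [])
      else banned) s ↔
    x ∈ s ∨ ∃ a ∈ allergies, x ∈ pvAllergenMap.getD a [] := by
  induction allergies generalizing s with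
  | nil => simp
  | cons a rest ih =>
    simp only [List.foldl_cons]
    by_cases h : pvAllergenMap.contains a = true
    · rw [if_pos h, ih]
      simp [PySem.Set.mem_update, or_assoc]
    · rw [if_neg h, ih]
      have hget : pvAllergenMap.getD a [] = [] := by
        have := (PySem.Dict.get?_eq_none_iff_contains pvAllergenMap a).mpr
          (by simpa using h)
        simp [PySem.Dict.getD, this]
      simp [hget]

-- the banned set characterised through the map's item list
theorem pv_banned_items (allergies : List String) (x : String) :
    (∃ a ∈ allergies, x ∈ pvAllergenMap.getD a []) ↔
    ∃ kv ∈ pvAllergenMap.items, kv.1 ∈ allergies ∧ x ∈ kv.2 := by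
  constructor
  · rintro ⟨a, ha, hx⟩
    cases hg : pvAllergenMap.get? a with
    | none => simp [PySem.Dict.getD, hg] at hx
    | some v =>
      refine ⟨(a, v), PySem.Dict.mem_items_of_get?_eq_some _ hg, ha, ?_⟩
      simpa [PySem.Dict.getD, hg] using hx
  · rintro ⟨kv, hkv, hin, hx⟩
    refine ⟨kv.1, hin, ?_⟩
    have : pvAllergenMap.get? kv.1 = some kv.2 :=
      PySem.Dict.get?_of_mem_items _ (by simpa using hkv) pv_keys_nodup
    simpa [PySem.Dict.getD, this] using hx

-- the inner loop of B's index build: membership per bucket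
theorem pv_mem_idx_inner (syns : List String) (d : PySem.Dict Char (List String))
    (c : Char) (x : String) :
    x ∈ (syns.foldl (fun index s =>
        index.modify (s.toList.headD ' ') [] (· ++ [s])) d).getD c [] ↔
    x ∈ d.getD c [] ∨ (x ∈ syns ∧ x.toList.headD ' ' = c) := by
  have hmap : syns.foldl (fun index s =>
      index.modify (s.toList.headD ' ') [] (· ++ [s])) d =
      (syns.map (fun s => (s.toList.headD ' ', s))).foldl
        (fun index p => index.modify p.1 [] (· ++ [p.2])) d := by
    rw [List.foldl_map]
  rw [hmap, PySem.Dict.getD_foldl_modify_append]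
  simp only [List.mem_append, List.mem_map, List.mem_filter]
  constructor
  · rintro (h | ⟨p, ⟨⟨s, hs, rfl⟩, hc⟩, rfl⟩)
    · exact Or.inl h
    · exact Or.inr ⟨hs, by simpa using hc⟩
  · rintro (h | ⟨hs, hc⟩)
    · exact Or.inl h
    · exact Or.inr ⟨(x.toList.headD ' ', x), ⟨⟨x, hs, rfl⟩, by simpa [List.headD_eq_head?_getD] using hc⟩, rfl⟩

-- membership in B's first-character index
theorem pv_mem_idx (allergies : List String) (kvs : List (String × List String))
    (d : PySem.Dict Char (List String)) (c : Char) (x : String) :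
    x ∈ (kvs.foldl (fun index kv =>
        if allergies.contains kv.1 then
          kv.2.foldl (fun index s =>
            index.modify (s.toList.headD ' ') [] (· ++ [s])) index
        else index) d).getD c [] ↔
    x ∈ d.getD c [] ∨
      ∃ kv ∈ kvs, kv.1 ∈ allergies ∧ x ∈ kv.2 ∧ x.toList.headD ' ' = c := by
  induction kvs generalizing d with
  | nil => simp
  | cons kv rest ih =>
    simp only [List.foldl_cons]
    by_cases h : allergies.contains kv.1 = true
    · rw [if_pos h, ih, pv_mem_idx_inner]
      have hm : kv.1 ∈ allergies := by simpa using h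
      simp only [List.mem_cons]
      constructor
      · rintro ((h0 | ⟨hs, hc⟩) | ⟨kv', h1, h2, h3, h4⟩)
        · exact Or.inl h0
        · exact Or.inr ⟨kv, Or.inl rfl, hm, hs, hc⟩
        · exact Or.inr ⟨kv', Or.inr h1, h2, h3, h4⟩
      · rintro (h0 | ⟨kv', h1 | h1, h2, h3, h4⟩)
        · exact Or.inl (Or.inl h0)
        · exact Or.inl (Or.inr ⟨by rwa [← h1], h4⟩)
        · exact Or.inr ⟨kv', h1, h2, h3, h4⟩
    · rw [if_neg h, ih]
      have hm : kv.1 ∉ allergies := by simpa using h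
      simp only [List.mem_cons]
      constructor
      · rintro (h0 | ⟨kv', h1, h2, h3, h4⟩)
        · exact Or.inl h0
        · exact Or.inr ⟨kv', Or.inr h1, h2, h3, h4⟩
      · rintro (h0 | ⟨kv', h1 | h1, h2, h3, h4⟩)
        · exact Or.inl h0
        · exact absurd h2 (h1 ▸ hm)
        · exact Or.inr ⟨kv', h1, h2, h3, h4⟩

-- the per-item predicates of the two ports agree
theorem pv_pred_eq (allergies : List String) (item : String) :
    (allergies.foldl (fun banned allergy =>
        if pvAllergenMap.contains allergy then
          PySem.Set.update banned (pvAllergenMap.getD allergy [])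
        else banned) PySem.Set.empty).any
          (fun b => PySem.Str.isIn b (PySem.Str.lower item)) =
    pvUnsafe (pvIdx allergies) item := by
  rw [Bool.eq_iff_iff]
  simp only [List.any_eq_true, pvUnsafe, pvIdx, List.mem_range, PySem.Str.toList_lower]
  have hiff : ∀ b : String, PySem.Str.isIn b (PySem.Str.lower item) = true ↔
      ∃ j, b.toList <+: (PySem.Chars.lower item.toList).drop j := by
    intro b
    rw [PySem.Str.isIn_iff_infix, PySem.Str.toList_lower,
      ← PySem.Chars.isIn_iff_infix, ← PySem.Chars.exists_prefix_drop_iff_isIn]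
  constructor
  · rintro ⟨b, hb, hin⟩
    rcases (pv_mem_banned allergies PySem.Set.empty b).mp hb with h0 | hmem
    · simp [PySem.Set.empty] at h0
    rcases (pv_banned_items allergies b).mp hmem with ⟨kv, hkv, hall, hbkv⟩
    rcases (hiff b).mp hin with ⟨j, hj⟩
    have hne : b.toList ≠ [] := pv_syn_ne_nil kv hkv b hbkv
    rcases hx : b.toList with _ | ⟨h0, t0⟩
    · exact absurd hx hne
    rw [hx] at hj
    have hhead : ((PySem.Chars.lower item.toList).drop j).head? = some h0 := by
      rcases hj with ⟨t, ht⟩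
      rw [← ht]; rfl
    have hjlt : j < (PySem.Chars.lower item.toList).length := by
      by_contra hge
      rw [List.drop_eq_nil_of_le (by omega)] at hhead
      simp at hhead
    have hgd : (PySem.Chars.lower item.toList)[j]?.getD ' ' = h0 := by
      rw [← List.head?_drop, hhead]; rfl
    refine ⟨j, hjlt, b, ?_, by simp [hx, List.isPrefixOf_iff_prefix, hj]⟩
    rw [pv_mem_idx]
    exact Or.inr ⟨kv, hkv, hall, hbkv, by simp [hx, hgd]⟩
  · rintro ⟨i, hi, pat, hpat, hpre⟩
    rw [pv_mem_idx] at hpat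
    rcases hpat with h0 | ⟨kv, hkv, hall, hpkv, _⟩
    · simp [PySem.Dict.getD_empty] at h0
    refine ⟨pat, (pv_mem_banned allergies PySem.Set.empty pat).mpr
      (Or.inr ((pv_banned_items allergies pat).mpr ⟨kv, hkv, hall, hpkv⟩)), ?_⟩
    exact (hiff pat).mpr ⟨i, (List.isPrefixOf_iff_prefix).mp hpre⟩

-- ===== VERDICT (by name: the statement is the Claim_ definition above) =====
theorem filter_allergies_spec : Claim_equal_filter_allergies := by
  intro items allergies _
  unfold Spec_filter_allergies
  dsimp only [filter_allergies, filter_allergies_alt]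
  have hfun : (fun (filtered : List String) (item : String) =>
      if (allergies.foldl (fun banned allergy =>
          if pvAllergenMap.contains allergy then
            PySem.Set.update banned (pvAllergenMap.getD allergy [])
          else banned) PySem.Set.empty).any
            (fun b => PySem.Str.isIn b (PySem.Str.lower item)) then filtered
      else filtered ++ [item]) =
      (fun (filtered : List String) (item : String) =>
        if (!(allergies.foldl (fun banned allergy =>
            if pvAllergenMap.contains allergy then
              PySem.Set.update banned (pvAllergenMap.getD allergy [])
            else banned) PySem.Set.empty).any
              (fun b => PySem.Str.isIn b (PySem.Str.lower item))) = true then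
          filtered ++ [item]
        else filtered) := by
    funext filtered item
    cases hb : (allergies.foldl (fun banned allergy =>
        if pvAllergenMap.contains allergy then
          PySem.Set.update banned (pvAllergenMap.getD allergy [])
        else banned) PySem.Set.empty).any
          (fun b => PySem.Str.isIn b (PySem.Str.lower item)) with
    | true => rfl
    | false => rfl
  rw [hfun]
  have key := PySem.List.foldl_append_if
    (fun item => !(allergies.foldl (fun banned allergy =>
        if pvAllergenMap.contains allergy then
          PySem.Set.update banned (pvAllergenMap.getD allergy [])
        else banned) PySem.Set.empty).any
          (fun b => PySem.Str.isIn b (PySem.Str.lower item)))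
    (fun x => x) items []
  simp only [List.map_id_fun', id_eq, List.nil_append] at key
  rw [key]
  exact List.filter_congr (fun item _ => by rw [pv_pred_eq allergies item])
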